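-- pv_equiv track=rewrite | github.com/maengjh0208/algorithm_coding_test | 귤 고르기.py | solution
-- ===== SOURCE A (Python) =====
-- def solution(k, tangerine):
--     size_value = dict()
--     for size in tangerine:
--         if size in size_value:
--             size_value[size] += 1
--         else:
--             size_value[size] = 1
--
--     size_list = sorted(size_value.values(), reverse=True)
--
--     count = 0
--     for size in size_list:
--         k -= size
--         count += 1
--         if k <= 0:
--             break
--
--     return count
-- ===== SOURCE B (Python) =====
-- def solution(k, tangerine):
--     # counting sort over group frequencies: no sorted() call
--     freq = {}
--     for s in tangerine:
--         freq[s] = freq.get(s, 0) + 1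
--     if not freq:
--         return 0
--     bucket = {}
--     maxf = 0
--     for f in freq.values():
--         bucket[f] = bucket.get(f, 0) + 1
--         if f > maxf:
--             maxf = f
--     count = 0
--     for f in range(maxf, 0, -1):
--         for _ in range(bucket.get(f, 0)):
--             k -= f
--             count += 1
--             if k <= 0:
--                 return count
--     return count
-- ===== Notes on version B (the rewrite author's own statement) =====
-- stated objective: alternative
-- what changed: Replaces sorted(values, reverse=True) and the flat greedy scan with a counting-sort bucket table over group frequencies traversed from the maximal frequency downward, with an early return inside the nested loop.
import Mathlib
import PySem

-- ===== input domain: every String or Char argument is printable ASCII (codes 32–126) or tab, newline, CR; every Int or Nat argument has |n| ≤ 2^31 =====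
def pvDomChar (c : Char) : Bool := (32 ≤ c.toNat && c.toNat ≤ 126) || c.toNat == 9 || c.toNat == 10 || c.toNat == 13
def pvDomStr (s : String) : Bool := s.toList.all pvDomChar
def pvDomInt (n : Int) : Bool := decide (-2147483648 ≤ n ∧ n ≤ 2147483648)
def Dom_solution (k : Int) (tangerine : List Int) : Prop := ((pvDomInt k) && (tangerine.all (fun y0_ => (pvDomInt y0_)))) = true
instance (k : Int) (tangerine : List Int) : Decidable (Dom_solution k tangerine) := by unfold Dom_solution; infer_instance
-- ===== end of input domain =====

-- B replaces sorted(values, reverse=True) by a counting-sort bucket table traversed from the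
-- maximal frequency downwards (alternative algorithm, no comparison sort).


-- ===== PORT A =====
-- the 'for size in size_list: k -= size; count += 1; if k <= 0: break' loop
def greedyA : List Int → Int → Int → Int
  | [], _, count => count
  | size :: rest, k, count =>
    if k - size ≤ 0 then count + 1 else greedyA rest (k - size) (count + 1)

def solution (k : Int) (tangerine : List Int) : Int :=
  let size_value := tangerine.foldl
    (fun d size => if d.contains size then d.insert size (d.getD size 0 + 1) else d.insert size 1)
    (PySem.Dict.empty : PySem.Dict Int Int)
  let size_list := PySem.List.sorted size_value.values (fun x => x) true
  greedyA size_list k 0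

-- ===== PORT B =====
-- the inner 'for _ in range(bucket.get(f, 0))' loop; Sum.inr = early 'return count'
def altInner (f : Int) : Nat → Int → Int → (Int × Int) ⊕ Int
  | 0, k, count => Sum.inl (k, count)
  | n + 1, k, count =>
    if k - f ≤ 0 then Sum.inr (count + 1) else altInner f n (k - f) (count + 1)

-- the outer 'for f in range(maxf, 0, -1)' loop
def altOuter (bucket : PySem.Dict Int Int) : List Int → Int → Int → Int
  | [], _, count => count
  | f :: rest, k, count =>
    match altInner f (bucket.getD f 0).toNat k count with
    | Sum.inr r => r
    | Sum.inl (k', c) => altOuter bucket rest k' c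

def solution_alt (k : Int) (tangerine : List Int) : Int :=
  let freq := tangerine.foldl (fun d s => d.insert s (d.getD s 0 + 1))
    (PySem.Dict.empty : PySem.Dict Int Int)
  if freq.values = [] then 0
  else
    let st := freq.values.foldl
      (fun (p : PySem.Dict Int Int × Int) f =>
        (p.1.insert f (p.1.getD f 0 + 1), if f > p.2 then f else p.2))
      (PySem.Dict.empty, 0)
    altOuter st.1 (PySem.List.pyRange st.2 0 (-1)) k 0

-- ===== PRECONDITION & SPEC =====
def Spec_solution (k : Int) (tangerine : List Int) (out : Int) : Prop := out = solution_alt k tangerine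
instance (k : Int) (tangerine : List Int) (out : Int) : Decidable (Spec_solution k tangerine out) := by unfold Spec_solution; infer_instance

-- ===== CLAIM (what is proved, stated in full; the proofs are below) =====
def Claim_equal_solution : Prop := ∀ (k : Int) (tangerine : List Int), Dom_solution k tangerine → Spec_solution k tangerine (solution k tangerine)

-- ===== LEMMAS AND PROOFS =====

-- A's dict-building loop builds Counter(tangerine)
lemma dictA_eq_counter (tangerine : List Int) :
    tangerine.foldl
      (fun d size => if d.contains size then d.insert size (d.getD size 0 + 1) else d.insert size 1)
      (PySem.Dict.empty : PySem.Dict Int Int) = PySem.Dict.counter tangerine := by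
  have h : (fun (d : PySem.Dict Int Int) size =>
      if d.contains size then d.insert size (d.getD size 0 + 1) else d.insert size 1) =
      (fun d size => d.insert size (d.getD size 0 + 1)) := by
    funext d size
    by_cases h : d.contains size
    · simp [h]
    · simp only [h, Bool.false_eq_true, if_false]
      rw [PySem.Dict.getD_of_not_contains d 0 (by simpa using h)]
      norm_num
  rw [h, PySem.Dict.foldl_insert_getD_add_one_eq_counter]

-- every counter value is a positive count
lemma one_le_of_mem_values (xs : List Int) (v : Int)
    (hv : v ∈ (PySem.Dict.counter xs).values) : 1 ≤ v := by
  simp only [PySem.Dict.values, PySem.Dict.items_counter, List.map_map, List.mem_map] at hv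
  obtain ⟨y, hy, rfl⟩ := hv
  have : y ∈ xs := (PySem.Set.mem_ofList xs y).mp hy
  have : 0 < xs.count y := List.count_pos_iff.mpr this
  simp only [Function.comp]
  exact_mod_cast this

-- running max: the fold in B computes an upper bound of the values
lemma init_le_foldl_runmax (l : List Int) (m : Int) :
    m ≤ l.foldl (fun m f => if f > m then f else m) m := by
  induction l generalizing m with
  | nil => simp
  | cons f t ih =>
    refine le_trans ?_ (ih (if f > m then f else m))
    split_ifs with h <;> omega

lemma le_foldl_runmax (l : List Int) :
    ∀ (m v : Int), v ∈ l → v ≤ l.foldl (fun m f => if f > m then f else m) m := by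
  induction l with
  | nil => intro m v hv; simp at hv
  | cons f t ih =>
    intro m v hv
    rcases List.mem_cons.mp hv with rfl | hvt
    · refine le_trans ?_ (init_le_foldl_runmax t (if v > m then v else m))
      split_ifs with h <;> omega
    · exact ih _ _ hvt

-- flattening: the bucket double loop is the flat greedy loop over the expanded list
lemma altInner_eq (f : Int) (n : Nat) (rest : List Int) :
    ∀ (k c : Int), greedyA (List.replicate n f ++ rest) k c =
      (match altInner f n k c with
       | Sum.inr r => r
       | Sum.inl (k', c') => greedyA rest k' c') := by
  induction n with
  | zero => intro k c; simp [altInner]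
  | succ n ih =>
    intro k c
    rw [List.replicate_succ, List.cons_append]
    show (if k - f ≤ 0 then c + 1 else greedyA (List.replicate n f ++ rest) (k - f) (c + 1)) = _
    by_cases h : k - f ≤ 0
    · simp [altInner, h]
    · simp only [h, if_false, altInner, ih]

lemma altOuter_eq (bucket : PySem.Dict Int Int) (fs : List Int) :
    ∀ (k c : Int), altOuter bucket fs k c =
      greedyA (fs.flatMap (fun f => List.replicate (bucket.getD f 0).toNat f)) k c := by
  induction fs with
  | nil => intro k c; simp [altOuter, greedyA]
  | cons f rest ih =>
    intro k c
    rw [List.flatMap_cons, altInner_eq]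
    show altOuter bucket (f :: rest) k c = _
    unfold altOuter
    rcases h : altInner f (bucket.getD f 0).toNat k c with ⟨k', c'⟩ | r
    · simp [ih]
    · simp

-- sum of an indicator map over a nodup list
lemma sum_map_ite_count (l : List Int) (x : Int) (g : Int → Nat) (hnd : l.Nodup) :
    (l.map (fun f => if f = x then g f else 0)).sum = if x ∈ l then g x else 0 := by
  induction l with
  | nil => simp
  | cons f t ih =>
    simp only [List.nodup_cons] at hnd
    simp only [List.map_cons, List.sum_cons, ih hnd.2]
    by_cases hfx : f = x
    · subst hfx
      simp [hnd.1]
    · simp [hfx, Ne.symm hfx, List.mem_cons]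

-- the countdown range is strictly decreasing and duplicate-free
lemma pyRange_neg_pairwise_gt (a b : Int) :
    (PySem.List.pyRange a b (-1)).Pairwise (fun p q => q < p) := by
  rw [PySem.List.pyRange_neg_one_eq_reverse]
  exact List.pairwise_reverse.mpr (PySem.List.pairwise_lt_pyRange_one (b + 1) (a + 1))

-- the expanded bucket list is the descending sort of the values
lemma flat_eq_sorted (vals : List Int) (M : Int)
    (h1 : ∀ v ∈ vals, 1 ≤ v) (h2 : ∀ v ∈ vals, v ≤ M) :
    (PySem.List.pyRange M 0 (-1)).flatMap
        (fun f => List.replicate (((vals.count f : Int)).toNat) f) =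
      PySem.List.sorted vals (fun x => x) true := by
  have hndr : (PySem.List.pyRange M 0 (-1)).Nodup :=
    (pyRange_neg_pairwise_gt M 0).imp (fun h => by omega)
  have hperm : ((PySem.List.pyRange M 0 (-1)).flatMap
      (fun f => List.replicate (((vals.count f : Int)).toNat) f)).Perm vals := by
    rw [List.perm_iff_count]
    intro x
    rw [List.count_flatMap]
    have hmap : ((PySem.List.pyRange M 0 (-1)).map
        (List.count x ∘ fun f => List.replicate (((vals.count f : Int)).toNat) f)) =
        ((PySem.List.pyRange M 0 (-1)).map (fun f => if f = x then vals.count f else 0)) := by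
      refine List.map_congr_left (fun f _ => ?_)
      simp [List.count_replicate]
    rw [hmap, sum_map_ite_count _ _ _ hndr]
    by_cases hx : x ∈ PySem.List.pyRange M 0 (-1)
    · simp [hx]
    · have hxv : x ∉ vals := fun hm =>
        hx (PySem.List.mem_pyRange_neg_one.mpr ⟨by have := h1 x hm; omega, h2 x hm⟩)
      simp [hx, List.count_eq_zero_of_not_mem hxv]
  have hgen : ∀ fs : List Int, fs.Pairwise (fun p q => q < p) →
      (fs.flatMap (fun f => List.replicate (((vals.count f : Int)).toNat) f)).Pairwise
        (fun a b => b ≤ a) := by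
    intro fs hfs
    induction fs with
    | nil => simp
    | cons f rest ih =>
      rw [List.pairwise_cons] at hfs
      rw [List.flatMap_cons, List.pairwise_append]
      refine ⟨List.pairwise_replicate.mpr (Or.inr le_rfl), ih hfs.2, ?_⟩
      intro a ha b hb
      obtain rfl := List.eq_of_mem_replicate ha
      obtain ⟨g, hg, hbg⟩ := List.mem_flatMap.mp hb
      obtain rfl := List.eq_of_mem_replicate hbg
      exact le_of_lt (hfs.1 _ hg)
  have hpw := hgen _ (pyRange_neg_pairwise_gt M 0)
  refine List.reverse_inj.mp ?_
  refine PySem.List.eq_of_perm_of_pairwise_le_of_injective (fun x => x) (fun a b h => h)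
    ?_ ?_ ?_
  · exact ((List.reverse_perm _).trans (hperm.trans (PySem.List.sorted_perm vals (fun x => x) true).symm)).trans
      (List.reverse_perm _).symm
  · exact List.pairwise_reverse.mpr hpw
  · exact List.pairwise_reverse.mpr (PySem.List.sorted_pairwise_rev vals (fun x => x))

-- ===== VERDICT (by name: the statement is the Claim_ definition above) =====
theorem solution_spec : Claim_equal_solution := by
  intro k tangerine _
  show solution k tangerine = solution_alt k tangerine
  unfold solution solution_alt
  rw [dictA_eq_counter, PySem.Dict.foldl_insert_getD_add_one_eq_counter]
  by_cases hv : (PySem.Dict.counter tangerine).values = []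
  · show greedyA (PySem.List.sorted (PySem.Dict.counter tangerine).values (fun x => x) true) k 0 =
      if (PySem.Dict.counter tangerine).values = [] then 0 else _
    rw [if_pos hv, hv,
      (PySem.List.sorted_eq_nil_iff ([] : List Int) (fun x => x) true).mpr rfl]
    rfl
  · show greedyA (PySem.List.sorted (PySem.Dict.counter tangerine).values (fun x => x) true) k 0 =
      if (PySem.Dict.counter tangerine).values = [] then 0 else
        altOuter
          (List.foldl
            (fun (p : PySem.Dict Int Int × Int) f =>
              (p.1.insert f (p.1.getD f 0 + 1), if f > p.2 then f else p.2))
            (PySem.Dict.empty, 0) (PySem.Dict.counter tangerine).values).1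
          (PySem.List.pyRange
            (List.foldl
              (fun (p : PySem.Dict Int Int × Int) f =>
                (p.1.insert f (p.1.getD f 0 + 1), if f > p.2 then f else p.2))
              (PySem.Dict.empty, 0) (PySem.Dict.counter tangerine).values).2 0 (-1)) k 0
    rw [if_neg hv]
    have hst : List.foldl
        (fun (p : PySem.Dict Int Int × Int) f =>
          (p.1.insert f (p.1.getD f 0 + 1), if f > p.2 then f else p.2))
        (PySem.Dict.empty, 0) (PySem.Dict.counter tangerine).values =
        ((PySem.Dict.counter tangerine).values.foldl
            (fun d f => d.insert f (d.getD f 0 + 1)) PySem.Dict.empty,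
         (PySem.Dict.counter tangerine).values.foldl
            (fun m f => if f > m then f else m) 0) :=
      PySem.List.foldl_prod_mk (fun (d : PySem.Dict Int Int) f => d.insert f (d.getD f 0 + 1))
        (fun (m : Int) f => if f > m then f else m)
        (PySem.Dict.counter tangerine).values PySem.Dict.empty 0
    rw [hst]
    show greedyA (PySem.List.sorted (PySem.Dict.counter tangerine).values (fun x => x) true) k 0 =
      altOuter
        ((PySem.Dict.counter tangerine).values.foldl
          (fun d f => d.insert f (d.getD f 0 + 1)) PySem.Dict.empty)
        (PySem.List.pyRange
          ((PySem.Dict.counter tangerine).values.foldl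
            (fun m f => if f > m then f else m) 0) 0 (-1)) k 0
    rw [PySem.Dict.foldl_insert_getD_add_one_eq_counter, altOuter_eq]
    have hcnt : (fun f =>
        List.replicate ((PySem.Dict.counter (PySem.Dict.counter tangerine).values).getD f 0).toNat f) =
        (fun f => List.replicate ((((PySem.Dict.counter tangerine).values.count f : Int)).toNat) f) := by
      funext f; rw [PySem.Dict.getD_counter]
    rw [hcnt, flat_eq_sorted _ _
      (fun v hvv => one_le_of_mem_values tangerine v hvv)
      (fun v hvv => le_foldl_runmax _ 0 v hvv)]
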